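-- pv_equiv track=rewrite | github.com/andrejkurusiov/advent-of-code-2020 | 2020/day6/day6.py | part2
-- ===== SOURCE A (Python) =====
-- testinput2 = ["abc", "", "a", "b", "c", "", "ab", "ac", "", "a", "a", "a", "a", "", "b"]
--
-- def parse_input2(inlist: list) -> list:
--     # creates a list of lists of sets (individual group answers)
--     # [ [{}, {}, ..], [{}, {}, ..], [{}, {}, ..], .. ]
--     data_list = []  # list of all groups
--     # artificially add empty item in order to mark the end of the last document
--     inlist.append("")
--     group = []
--     # answer = set()
--     for item in inlist:
--         if item:  # not an empty line => belongs to the same group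
--             group.append(set(item))
--         else:  # starts new document
--             data_list.append(group)
--             group = []
--     return data_list
--
-- def part2(inlist=testinput2):
--     # goes list items (lists) and sets inside each internal list
--     # finds intersections of sets in internal lists
--     # and sums the lengths of each intersection
--     sum_yes = 0
--     for group in parse_input2(inlist):
--         # special case as .intersection() can not be done with jus tone set
--         if len(group) == 1:
--             sum_yes += len(group[0])
--         # find intersection of all sets in an internal list if list > 1 set
--         elif len(group) > 1:
--             yes = group[0]
--             for item in group[1:]:
--                 yes = yes.intersection(item)
--             sum_yes += len(yes)
--     return sum_yes
-- ===== SOURCE B (Python) =====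
-- testinput2 = ["abc", "", "a", "b", "c", "", "ab", "ac", "", "a", "a", "a", "a", "", "b"]
--
-- def part2(inlist=testinput2):
--     # One pass: group lines, and per group count letters with a frequency dict;
--     # the group's contribution is the number of letters seen in every member.
--     inlist.append("")  # same flush-the-last-group mutation as the original
--     total = 0
--     group = []
--     for line in inlist:
--         if line:
--             group.append(line)
--         else:
--             if group:
--                 counts = {}
--                 for member in group:
--                     for ch in set(member):
--                         counts[ch] = counts.get(ch, 0) + 1
--                 total += sum(1 for v in counts.values() if v == len(group))
--             group = []
--     return total
-- ===== Notes on version B (the rewrite author's own statement) =====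
-- stated objective: alternative
-- what changed: Replaces parse_input2's list-of-sets construction plus the per-group pairwise set.intersection fold by a single fused pass that groups lines and, per group, builds a letter-frequency dict and counts letters whose frequency equals the group size.
import Mathlib
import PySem

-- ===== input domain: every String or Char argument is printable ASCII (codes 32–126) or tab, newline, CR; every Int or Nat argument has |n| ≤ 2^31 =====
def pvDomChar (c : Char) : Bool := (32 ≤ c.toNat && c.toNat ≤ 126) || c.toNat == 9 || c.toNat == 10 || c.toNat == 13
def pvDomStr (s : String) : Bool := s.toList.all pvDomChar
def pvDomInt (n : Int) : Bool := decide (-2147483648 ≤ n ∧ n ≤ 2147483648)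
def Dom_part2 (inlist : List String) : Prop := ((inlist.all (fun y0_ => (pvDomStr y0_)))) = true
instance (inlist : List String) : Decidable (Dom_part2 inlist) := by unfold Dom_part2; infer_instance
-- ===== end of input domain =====

-- B replaces the per-group pairwise set-intersection fold by a single frequency-count
-- pass (letters seen by every member), fused with the grouping loop (objective: alternative).
-- Both A and B mutate the argument list (append ""); the theorems are about the return value only.

-- ===== PORT A =====
def parseStep (st : List (List (PySem.Set Char)) × List (PySem.Set Char)) (item : String) :
    List (List (PySem.Set Char)) × List (PySem.Set Char) :=
  if item ≠ "" then (st.1, st.2 ++ [PySem.Set.ofList item.toList])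
  else (st.1 ++ [st.2], [])

def parse_input2 (inlist : List String) : List (List (PySem.Set Char)) :=
  ((inlist ++ [""]).foldl parseStep ([], [])).1

def groupContrib (sum_yes : Int) (group : List (PySem.Set Char)) : Int :=
  if group.length = 1 then sum_yes + PySem.Set.len group.headI
  else if 1 < group.length then
    sum_yes + PySem.Set.len ((group.drop 1).foldl PySem.Set.inter group.headI)
  else sum_yes

def part2 (inlist : List String) : Int :=
  (parse_input2 inlist).foldl groupContrib 0

-- ===== PORT B =====
def bCount (group : List String) : Int :=
  let counts := group.foldl
    (fun d member => (PySem.Set.ofList member.toList).foldl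
        (fun d ch => d.modify ch 0 (· + 1)) d)
    PySem.Dict.empty
  ((counts.values.countP (fun v => v == (group.length : Int)) : Nat) : Int)

def bStep (st : Int × List String) (line : String) : Int × List String :=
  if line ≠ "" then (st.1, st.2 ++ [line])
  else (if st.2 ≠ [] then st.1 + bCount st.2 else st.1, [])

def part2_alt (inlist : List String) : Int :=
  ((inlist ++ [""]).foldl bStep (0, [])).1

-- ===== PRECONDITION & SPEC =====
def Spec_part2 (inlist : List String) (out : Int) : Prop := out = part2_alt inlist
instance (inlist : List String) (out : Int) : Decidable (Spec_part2 inlist out) := by unfold Spec_part2; infer_instance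

-- ===== CLAIM (what is proved, stated in full; the proofs are below) =====
def Claim_equal_part2 : Prop := ∀ (inlist : List String), Dom_part2 inlist → Spec_part2 inlist (part2 inlist)

-- ===== LEMMAS AND PROOFS =====
def sigma (m : String) : PySem.Set Char := PySem.Set.ofList m.toList

def flatChars (gs : List String) : List Char := gs.flatMap (fun m => sigma m)

lemma nested_foldl_eq (gs : List String) (d : PySem.Dict Char Int) :
    gs.foldl (fun d member => (PySem.Set.ofList member.toList).foldl
        (fun d ch => d.modify ch 0 (· + 1)) d) d
      = (flatChars gs).foldl (fun d ch => d.modify ch 0 (· + 1)) d := by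
  induction gs generalizing d with
  | nil => simp [flatChars]
  | cons h t ih => simp [flatChars, List.foldl_append, ih, sigma]

lemma count_flatChars (gs : List String) (c : Char) :
    (flatChars gs).count c = gs.countP (fun m => decide (c ∈ sigma m)) := by
  induction gs with
  | nil => simp [flatChars]
  | cons h t ih =>
    simp only [flatChars, List.flatMap_cons, List.count_append, List.countP_cons]
    rw [show (t.flatMap fun m => (sigma m : List Char)) = flatChars t from rfl, ih]
    have hnd : (sigma h).Nodup := PySem.Set.nodup_ofList _
    by_cases hc : c ∈ sigma h
    · rw [List.count_eq_one_of_mem hnd hc]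
      simp [hc]; omega
    · rw [List.count_eq_zero_of_not_mem hc]
      simp [hc]

lemma mem_foldl_inter (l : List (PySem.Set Char)) (s : PySem.Set Char) (c : Char) :
    c ∈ l.foldl PySem.Set.inter s ↔ c ∈ s ∧ ∀ t ∈ l, c ∈ t := by
  induction l generalizing s with
  | nil => simp
  | cons h t ih =>
    simp [List.foldl_cons, ih, PySem.Set.mem_inter]
    tauto

lemma nodup_foldl_inter (l : List (PySem.Set Char)) (s : PySem.Set Char) (hs : s.Nodup) :
    (l.foldl PySem.Set.inter s).Nodup := by
  induction l generalizing s with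
  | nil => exact hs
  | cons h t ih => exact ih _ (PySem.Set.nodup_inter s h hs)

lemma core (h : String) (tl : List String) :
    PySem.Set.len ((tl.map sigma).foldl PySem.Set.inter (sigma h)) = bCount (h :: tl) := by
  have hndh : (sigma h).Nodup := PySem.Set.nodup_ofList _
  have hndI : ((tl.map sigma).foldl PySem.Set.inter (sigma h)).Nodup :=
    nodup_foldl_inter _ _ hndh
  simp only [bCount]
  rw [nested_foldl_eq, ← PySem.Dict.counter_eq_foldl]
  have hvals : (PySem.Dict.counter (flatChars (h :: tl))).values
      = (PySem.Set.ofList (flatChars (h :: tl))).map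
          (fun k => (((flatChars (h :: tl)).count k : Nat) : Int)) := by
    simp [PySem.Dict.values, PySem.Dict.items_counter]
  rw [hvals, List.countP_map]
  have hpred : ∀ k : Char,
      ((fun v => v == (((h :: tl).length : Nat) : Int)) ∘
        (fun k => (((flatChars (h :: tl)).count k : Nat) : Int))) k
        = decide (∀ m ∈ (h :: tl), k ∈ sigma m) := by
    intro k
    simp only [Function.comp_apply]
    rw [Bool.eq_iff_iff]
    rw [beq_iff_eq, decide_eq_true_eq, Int.natCast_inj, count_flatChars,
      List.countP_eq_length]
    simp
  rw [funext hpred]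
  have hlen : PySem.Set.len ((tl.map sigma).foldl PySem.Set.inter (sigma h))
      = (((tl.map sigma).foldl PySem.Set.inter (sigma h)).length : Int) := rfl
  rw [hlen]
  congr 1
  rw [List.countP_eq_length_filter]
  apply List.Perm.length_eq
  rw [List.perm_ext_iff_of_nodup hndI ((PySem.Set.nodup_ofList _).filter _)]
  intro c
  simp only [mem_foldl_inter, List.mem_filter, PySem.Set.mem_ofList, flatChars,
    List.mem_flatMap, decide_eq_true_eq, List.mem_map, List.mem_cons]
  constructor
  · rintro ⟨hch, hall⟩
    refine ⟨⟨h, Or.inl rfl, hch⟩, ?_⟩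
    rintro m (rfl | hm)
    · exact hch
    · exact hall _ ⟨m, hm, rfl⟩
  · rintro ⟨_, hall⟩
    exact ⟨hall h (Or.inl rfl), fun t ht => by
      rcases ht with ⟨m, hm, rfl⟩; exact hall m (Or.inr hm)⟩

lemma perGroup (t : Int) (gs : List String) :
    groupContrib t (gs.map sigma) = if gs ≠ [] then t + bCount gs else t := by
  cases gs with
  | nil => simp [groupContrib]
  | cons h tl =>
    rw [← core]
    cases tl with
    | nil => simp [groupContrib]
    | cons a b => simp [groupContrib]

lemma loop (rest : List String) : ∀ (dl : List (List (PySem.Set Char))) (t : Int) (gs : List String),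
    t = dl.foldl groupContrib 0 →
    (rest.foldl bStep (t, gs)).1 = ((rest.foldl parseStep (dl, gs.map sigma)).1).foldl groupContrib 0 := by
  induction rest with
  | nil => intro dl t gs ht; simpa using ht
  | cons a rest ih =>
    intro dl t gs ht
    by_cases ha : a = ""
    · subst ha
      simp only [List.foldl_cons, bStep, parseStep, ne_eq, not_true_eq_false, if_false]
      apply ih
      rw [List.foldl_append, List.foldl_cons, List.foldl_nil, perGroup, ht]
    · simp only [List.foldl_cons, bStep, parseStep, ne_eq, ha, not_false_eq_true, if_true]
      rw [show gs.map sigma ++ [PySem.Set.ofList a.toList] = (gs ++ [a]).map sigma by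
        simp [sigma]]
      exact ih dl t (gs ++ [a]) ht

-- ===== VERDICT (by name: the statement is the Claim_ definition above) =====
theorem part2_spec : Claim_equal_part2 := by
  intro inlist _
  unfold Spec_part2 part2 part2_alt parse_input2
  exact (loop (inlist ++ [""]) [] 0 [] rfl).symm
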